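-- pv_equiv track=rewrite | github.com/Madeline-Ellingson/MavPASS-for-CIS122-Spring2022 | MavPASS_1-19_FirstQuiz/FirstQuizCIS122.py | removeHigher
-- ===== SOURCE A (Python) =====
-- def removeHigher(aList):
--
--     aNewList = []
--
--     for num in aList:
--         aNewList.append(num)
--
--     j = 0
--
--     for i in range(len(aList) - 1):
--         if aList[j] < aList[i + 1]:
--             aNewList.remove(aList[i + 1])
--         else:
--             if(j < len(aList) - 1):
--                 j += 1
--
--     return aNewList
-- ===== SOURCE B (Python) =====
-- def removeHigher(aList):
--     n = len(aList)
--     # One pass: replay the j-pointer scan, but only COUNT removals per value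
--     # instead of doing O(n) list.remove calls.
--     to_drop = {}
--     j = 0
--     for i in range(1, n):
--         if aList[j] < aList[i]:
--             to_drop[aList[i]] = to_drop.get(aList[i], 0) + 1
--         elif j < n - 1:
--             j += 1
--     # Second pass: drop, for each value, its earliest occurrences.
--     seen = {}
--     result = []
--     for num in aList:
--         k = seen.get(num, 0)
--         if k >= to_drop.get(num, 0):
--             result.append(num)
--         seen[num] = k + 1
--     return result
-- ===== Notes on version B (the rewrite author's own statement) =====
-- stated objective: alternative
-- what changed: A rebuilds the list and calls list.remove (a list scan) inside the index loop; B replays the same j-pointer scan but only counts removals per value in a dict, then a separate filtering pass drops the earliest occurrences of each value.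
import Mathlib
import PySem

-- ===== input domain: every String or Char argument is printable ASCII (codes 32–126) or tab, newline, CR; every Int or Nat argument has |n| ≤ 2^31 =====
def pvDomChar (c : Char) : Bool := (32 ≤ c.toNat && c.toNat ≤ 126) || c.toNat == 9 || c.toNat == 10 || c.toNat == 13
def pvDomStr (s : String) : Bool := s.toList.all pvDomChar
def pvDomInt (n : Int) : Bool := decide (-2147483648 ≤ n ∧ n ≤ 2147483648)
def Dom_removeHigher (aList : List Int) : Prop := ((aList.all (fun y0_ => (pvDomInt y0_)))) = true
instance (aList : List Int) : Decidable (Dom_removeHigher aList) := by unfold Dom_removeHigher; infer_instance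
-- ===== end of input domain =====

-- B replaces A's scan with interleaved list.remove calls by a different algorithm:
-- one counting pass (per-value removal counts in a dict) plus one filtering pass
-- that drops the earliest occurrences of each counted value.

-- ===== PORT A =====
-- aNewList.remove(v): remove the first occurrence of v.  In A the removed value is
-- always present in the list, so remove? never returns none; the none branch
-- (Python would raise ValueError, unreachable here) keeps the list unchanged.
def pyRemoveD (l : List Int) (v : Int) : List Int :=
  (PySem.List.remove? l v).getD l

-- indices: j stays in [0, len-1] (it only increments while j < len-1) and i+1 in
-- [1, len-1], so pyGetD's default 0 is never used (Python never raises IndexError here).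
def removeHigher (aList : List Int) : List Int :=
  let aNewList := aList.foldl (fun acc num => acc ++ [num]) []
  let st := (PySem.List.pyRange 0 ((aList.length : Int) - 1) 1).foldl
    (fun (st : List Int × Int) i =>
      if PySem.List.pyGetD aList st.2 0 < PySem.List.pyGetD aList (i + 1) 0 then
        (pyRemoveD st.1 (PySem.List.pyGetD aList (i + 1) 0), st.2)
      else if st.2 < (aList.length : Int) - 1 then (st.1, st.2 + 1)
      else st) (aNewList, (0 : Int))
  st.1

-- ===== PORT B =====
def removeHigher_alt (aList : List Int) : List Int :=
  let n : Int := aList.length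
  -- first pass: replay the j-scan, only counting removals per value
  let fst := (PySem.List.pyRange 1 n 1).foldl
    (fun (st : PySem.Dict Int Int × Int) i =>
      if PySem.List.pyGetD aList st.2 0 < PySem.List.pyGetD aList i 0 then
        (st.1.insert (PySem.List.pyGetD aList i 0)
           (st.1.getD (PySem.List.pyGetD aList i 0) 0 + 1), st.2)
      else if st.2 < n - 1 then (st.1, st.2 + 1)
      else st) (PySem.Dict.empty, (0 : Int))
  let toDrop := fst.1
  -- second pass: drop, for each value, its earliest occurrences
  let snd := aList.foldl
    (fun (st : PySem.Dict Int Int × List Int) num =>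
      let k := st.1.getD num 0
      (st.1.insert num (k + 1),
       if k ≥ toDrop.getD num 0 then st.2 ++ [num] else st.2))
    (PySem.Dict.empty, ([] : List Int))
  snd.2

-- ===== PRECONDITION & SPEC =====
def Spec_removeHigher (aList : List Int) (out : List Int) : Prop := out = removeHigher_alt aList
instance (aList : List Int) (out : List Int) : Decidable (Spec_removeHigher aList out) := by unfold Spec_removeHigher; infer_instance

-- ===== CLAIM (what is proved, stated in full; the proofs are below) =====
def Claim_equal_removeHigher : Prop := ∀ (aList : List Int), Dom_removeHigher aList → Spec_removeHigher aList (removeHigher aList)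

-- ===== LEMMAS AND PROOFS =====

-- drop, per value v, the first (c v) occurrences of v
def dropCnt (c : Int → Nat) : List Int → List Int
  | [] => []
  | x :: xs => if c x = 0 then x :: dropCnt c xs
               else dropCnt (fun y => if y = x then c x - 1 else c y) xs

theorem pyRemoveD_nil (v : Int) : pyRemoveD [] v = [] := rfl

theorem pyRemoveD_cons (x v : Int) (xs : List Int) :
    pyRemoveD (x :: xs) v = if x = v then xs else x :: pyRemoveD xs v := by
  by_cases h : x = v
  · subst h; simp [pyRemoveD]
  · rw [if_neg h]
    simp only [pyRemoveD, PySem.List.remove?_cons_of_ne xs h]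
    cases PySem.List.remove? xs v <;> simp

theorem dropCnt_zero' (c : Int → Nat) (h : ∀ v, c v = 0) (l : List Int) :
    dropCnt c l = l := by
  induction l with
  | nil => rfl
  | cons x xs ih => simp [dropCnt, h x, ih]

-- core: removing the first occurrence of v after dropping counts c
-- equals dropping counts c bumped at v
theorem removeD_dropCnt (l : List Int) : ∀ (c : Int → Nat) (v : Int),
    pyRemoveD (dropCnt c l) v = dropCnt (fun y => if y = v then c y + 1 else c y) l := by
  induction l with
  | nil => intro c v; simp [dropCnt, pyRemoveD_nil]
  | cons x xs ih =>
    intro c v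
    by_cases hx : c x = 0
    · rw [dropCnt, if_pos hx, pyRemoveD_cons]
      by_cases hxv : x = v
      · rw [if_pos hxv]
        have hbx : (fun y => if y = v then c y + 1 else c y) x ≠ 0 := by
          simp [hxv]
        rw [dropCnt, if_neg hbx]
        congr 1
        funext y
        by_cases hy : y = x <;> by_cases hyv : y = v <;> simp_all
      · rw [if_neg hxv]
        have hbx : (fun y => if y = v then c y + 1 else c y) x = 0 := by
          simp only [if_neg hxv]; exact hx
        rw [dropCnt, if_pos hbx, ih]
    · have hbx : (fun y => if y = v then c y + 1 else c y) x ≠ 0 := by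
        by_cases hxv : x = v <;> simp [hxv, hx]
      rw [dropCnt, if_neg hx, dropCnt, if_neg hbx, ih]
      congr 1
      funext y
      by_cases hyx : y = x <;> by_cases hyv : y = v <;>
        (simp_all; try omega)

def cntF (d : PySem.Dict Int Int) : Int → Nat := fun v => (d.getD v 0).toNat

-- generic paired-fold lemma
theorem foldl_rel {α β γ : Type} (f : α → γ → α) (g : β → γ → β) (R : α → β → Prop)
    (h : ∀ a b c, R a b → R (f a c) (g b c)) :
    ∀ (l : List γ) (a : α) (b : β), R a b → R (l.foldl f a) (l.foldl g b) := by
  intro l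
  induction l with
  | nil => intro a b hab; exact hab
  | cons x xs ih => intro a b hab; exact ih _ _ (h a b x hab)

-- second pass of B computes dropCnt of the remaining counts
theorem scan_keep (toDrop : PySem.Dict Int Int) (l : List Int) :
    ∀ (seen : PySem.Dict Int Int) (acc : List Int),
      (∀ v, 0 ≤ toDrop.getD v 0) → (∀ v, 0 ≤ seen.getD v 0) →
      (l.foldl
        (fun (st : PySem.Dict Int Int × List Int) num =>
          let k := st.1.getD num 0
          (st.1.insert num (k + 1),
           if k ≥ toDrop.getD num 0 then st.2 ++ [num] else st.2))
        (seen, acc)).2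
      = acc ++ dropCnt (fun v => (toDrop.getD v 0).toNat - (seen.getD v 0).toNat) l := by
  induction l with
  | nil => intro seen acc _ _; simp [dropCnt]
  | cons x xs ih =>
    intro seen acc hT hS
    have hS' : ∀ v, 0 ≤ (seen.insert x (seen.getD x 0 + 1)).getD v 0 := by
      intro v
      rw [PySem.Dict.getD_insert]
      split_ifs with hv
      · have := hS x; omega
      · exact hS v
    by_cases hk : seen.getD x 0 ≥ toDrop.getD x 0
    · have h0 : (toDrop.getD x 0).toNat - (seen.getD x 0).toNat = 0 := by
        have := hS x; have := hT x; omega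
      simp only [List.foldl_cons, if_pos hk]
      rw [ih _ _ hT hS']
      have hfun : (fun v => (toDrop.getD v 0).toNat - ((seen.insert x (seen.getD x 0 + 1)).getD v 0).toNat)
          = fun v => (toDrop.getD v 0).toNat - (seen.getD v 0).toNat := by
        funext v
        rw [PySem.Dict.getD_insert]
        split_ifs with hv
        · subst hv; have := hS v; have := hT v; omega
        · rfl
      rw [hfun, dropCnt]
      simp [h0]
    · have h0 : (toDrop.getD x 0).toNat - (seen.getD x 0).toNat ≠ 0 := by
        have := hS x; have := hT x; omega
      simp only [List.foldl_cons, if_neg hk]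
      rw [ih _ _ hT hS']
      rw [dropCnt, if_neg h0]
      congr 2
      funext v
      rw [PySem.Dict.getD_insert]
      split_ifs with hv
      · subst hv; have := hS v; have := hT v; omega
      · rfl

-- combined invariant between A's scan state and B's first-pass state
def ScanRel (aList : List Int) (a : List Int × Int) (b : PySem.Dict Int Int × Int) : Prop :=
  a.2 = b.2 ∧ (∀ v, 0 ≤ b.1.getD v 0) ∧ a.1 = dropCnt (cntF b.1) aList

theorem scan_step (aList : List Int) (a : List Int × Int) (b : PySem.Dict Int Int × Int)
    (k : Nat) (h : ScanRel aList a b) :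
    ScanRel aList
      (if PySem.List.pyGetD aList a.2 0 < PySem.List.pyGetD aList (0 + (k : Int) + 1) 0 then
        (pyRemoveD a.1 (PySem.List.pyGetD aList (0 + (k : Int) + 1) 0), a.2)
      else if a.2 < (aList.length : Int) - 1 then (a.1, a.2 + 1) else a)
      (if PySem.List.pyGetD aList b.2 0 < PySem.List.pyGetD aList (1 + (k : Int)) 0 then
        (b.1.insert (PySem.List.pyGetD aList (1 + (k : Int)) 0)
           (b.1.getD (PySem.List.pyGetD aList (1 + (k : Int)) 0) 0 + 1), b.2)
      else if b.2 < (aList.length : Int) - 1 then (b.1, b.2 + 1) else b) := by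
  obtain ⟨hj, hnn, hl⟩ := h
  have hidx : (0 : Int) + (k : Int) + 1 = 1 + (k : Int) := by ring
  rw [hidx, hj]
  set v := PySem.List.pyGetD aList (1 + (k : Int)) 0 with hv
  by_cases hc : PySem.List.pyGetD aList b.2 0 < v
  · rw [if_pos hc, if_pos hc]
    refine ⟨rfl, ?_, ?_⟩
    · intro w
      rw [PySem.Dict.getD_insert]
      split_ifs with hw
      · have := hnn v; omega
      · exact hnn w
    · have hfun : cntF (b.1.insert v (b.1.getD v 0 + 1))
          = fun y => if y = v then cntF b.1 y + 1 else cntF b.1 y := by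
        funext y
        simp only [cntF, PySem.Dict.getD_insert]
        split_ifs with hy
        · subst hy; have := hnn v; omega
        · rfl
      show pyRemoveD a.1 v = dropCnt (cntF (b.1.insert v (b.1.getD v 0 + 1))) aList
      rw [hfun, hl, removeD_dropCnt]
  · rw [if_neg hc, if_neg hc]
    by_cases hb : b.2 < (aList.length : Int) - 1
    · rw [if_pos hb, if_pos hb]; exact ⟨rfl, hnn, hl⟩
    · rw [if_neg hb, if_neg hb]; exact ⟨hj, hnn, hl⟩

-- ===== VERDICT (by name: the statement is the Claim_ definition above) =====
theorem removeHigher_spec : Claim_equal_removeHigher := by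
  intro aList _
  unfold Spec_removeHigher removeHigher removeHigher_alt
  simp only [PySem.List.foldl_append_singleton_eq_self, List.nil_append]
  -- rewrite both pyRange folds as folds over List.range (n-1).toNat
  rw [PySem.List.pyRange_one ((0 : Int)) ((aList.length : Int) - 1),
      PySem.List.pyRange_one ((1 : Int)) ((aList.length : Int)),
      List.foldl_map, List.foldl_map]
  rw [show ((aList.length : Int) - 1 - 0) = ((aList.length : Int) - 1) from by ring,
      show ((aList.length : Int) - 1) = ((aList.length : Int) - 1) from rfl]
  have hrel := foldl_rel
    (fun (st : List Int × Int) (k : Nat) =>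
      if PySem.List.pyGetD aList st.2 0 < PySem.List.pyGetD aList (0 + (k : Int) + 1) 0 then
        (pyRemoveD st.1 (PySem.List.pyGetD aList (0 + (k : Int) + 1) 0), st.2)
      else if st.2 < (aList.length : Int) - 1 then (st.1, st.2 + 1) else st)
    (fun (st : PySem.Dict Int Int × Int) (k : Nat) =>
      if PySem.List.pyGetD aList st.2 0 < PySem.List.pyGetD aList (1 + (k : Int)) 0 then
        (st.1.insert (PySem.List.pyGetD aList (1 + (k : Int)) 0)
           (st.1.getD (PySem.List.pyGetD aList (1 + (k : Int)) 0) 0 + 1), st.2)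
      else if st.2 < (aList.length : Int) - 1 then (st.1, st.2 + 1) else st)
    (ScanRel aList)
    (fun a b k h => scan_step aList a b k h)
    (List.range ((aList.length : Int) - 1).toNat)
    (aList, (0 : Int)) (PySem.Dict.empty, (0 : Int))
    ⟨rfl, fun v => by simp [PySem.Dict.getD_empty], by
      rw [dropCnt_zero']; intro v; simp [cntF, PySem.Dict.getD_empty]⟩
  obtain ⟨_, hnn, hfin⟩ := hrel
  rw [hfin]
  rw [scan_keep _ _ _ _ hnn (fun v => by simp [PySem.Dict.getD_empty])]
  simp only [List.nil_append]
  congr 1
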